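-- pv_equiv track=rewrite | github.com/pandas-dev/pandas | myenv/lib/python3.12/site-packages/asv/statistics.py | mann_whitney_u_u
-- ===== SOURCE A (Python) =====
-- def mann_whitney_u_u(x, y):
--     u = 0
--     ties = 0
--     for xx in x:
--         for yy in y:
--             if xx > yy:
--                 u += 1
--             elif xx == yy:
--                 ties += 1
--     return u, ties
-- ===== SOURCE B (Python) =====
-- import bisect
--
-- def mann_whitney_u_u(x, y):
--     ys = sorted(y)
--     u = 0
--     ties = 0
--     for xx in x:
--         lo = bisect.bisect_left(ys, xx)
--         hi = bisect.bisect_right(ys, xx)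
--         u += lo
--         ties += hi - lo
--     return u, ties
-- ===== Notes on version B (the rewrite author's own statement) =====
-- stated objective: faster
-- what changed: Replaces the nested O(n*m) pairwise comparison with sorting y once and binary-searching (bisect_left/bisect_right) each x element to count smaller and equal y values.
import Mathlib
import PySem

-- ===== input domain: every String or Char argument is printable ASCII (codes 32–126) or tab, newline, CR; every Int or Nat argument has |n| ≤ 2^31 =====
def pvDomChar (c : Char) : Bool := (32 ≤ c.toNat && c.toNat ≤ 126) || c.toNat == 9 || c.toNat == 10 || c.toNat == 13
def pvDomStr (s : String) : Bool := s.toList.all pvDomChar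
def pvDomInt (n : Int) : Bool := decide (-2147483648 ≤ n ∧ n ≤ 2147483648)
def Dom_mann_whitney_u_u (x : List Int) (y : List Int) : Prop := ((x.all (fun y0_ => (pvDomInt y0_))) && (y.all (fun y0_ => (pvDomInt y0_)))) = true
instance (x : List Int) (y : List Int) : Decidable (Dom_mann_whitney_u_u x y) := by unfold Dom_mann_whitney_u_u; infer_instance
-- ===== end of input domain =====

-- B replaces A's nested O(n*m) pair scan by sorting y once and binary-searching each x (faster, asymptotic).


-- ===== PORT A =====
def mann_whitney_u_u (x : List Int) (y : List Int) : Int × Int :=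
  x.foldl (fun ut xx =>
    y.foldl (fun ut yy =>
      if xx > yy then (ut.1 + 1, ut.2)
      else if xx = yy then (ut.1, ut.2 + 1)
      else ut) ut) (0, 0)

-- ===== PORT B =====
def mann_whitney_u_u_alt (x : List Int) (y : List Int) : Int × Int :=
  let ys := PySem.List.sorted y (fun v => v) false
  x.foldl (fun ut xx =>
    let lo := PySem.List.bisectLeft ys xx
    let hi := PySem.List.bisectRight ys xx
    (ut.1 + (lo : Int), ut.2 + ((hi : Int) - (lo : Int)))) (0, 0)

-- ===== PRECONDITION & SPEC =====
def Spec_mann_whitney_u_u (x : List Int) (y : List Int) (out : Int × Int) : Prop := out = mann_whitney_u_u_alt x y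
instance (x : List Int) (y : List Int) (out : Int × Int) : Decidable (Spec_mann_whitney_u_u x y out) := by unfold Spec_mann_whitney_u_u; infer_instance

-- ===== CLAIM (what is proved, stated in full; the proofs are below) =====
def Claim_equal_mann_whitney_u_u : Prop := ∀ (x : List Int) (y : List Int), Dom_mann_whitney_u_u x y → Spec_mann_whitney_u_u x y (mann_whitney_u_u x y)

-- ===== LEMMAS AND PROOFS =====

-- a predicate true strictly below index r and false from r on counts to exactly r
theorem countP_eq_of_cut (p : Int → Bool) (l : List Int) (r : Nat) (hr : r ≤ l.length)
    (h1 : ∀ (j : Nat) (hj : j < l.length), j < r → p l[j] = true)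
    (h2 : ∀ (j : Nat) (hj : j < l.length), r ≤ j → p l[j] = false) :
    l.countP p = r := by
  have hsplit : l.countP p = (l.take r).countP p + (l.drop r).countP p := by
    conv_lhs => rw [← List.take_append_drop r l]
    exact List.countP_append ..
  have htake : (l.take r).countP p = r := by
    rw [List.countP_eq_length.mpr, List.length_take]
    · omega
    · intro a ha
      rw [List.mem_iff_getElem] at ha
      obtain ⟨j, hj, rfl⟩ := ha
      rw [List.getElem_take]
      have hjl : j < l.length := by
        have := hj; rw [List.length_take] at this; omega
      exact h1 j hjl (by have := hj; rw [List.length_take] at this; omega)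
  have hdrop : (l.drop r).countP p = 0 := by
    rw [List.countP_eq_zero]
    intro a ha
    rw [List.mem_iff_getElem] at ha
    obtain ⟨j, hj, rfl⟩ := ha
    rw [List.getElem_drop]
    have hjl : r + j < l.length := by
      have := hj; rw [List.length_drop] at this; omega
    simp [h2 (r + j) hjl (by omega)]
  omega

theorem bisectLeft_eq_countP (ys : List Int) (v : Int)
    (hs : List.Pairwise (fun a b => a ≤ b) ys) :
    PySem.List.bisectLeft ys v = ys.countP (fun a => decide (a < v)) := by
  obtain ⟨hle, h1, h2⟩ := PySem.List.bisectLeft_spec ys v hs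
  exact (countP_eq_of_cut _ ys _ hle
    (fun j hj hjr => by simpa using h1 j hj hjr)
    (fun j hj hrj => by simpa using h2 j hj hrj)).symm

theorem bisectRight_eq_countP (ys : List Int) (v : Int)
    (hs : List.Pairwise (fun a b => a ≤ b) ys) :
    PySem.List.bisectRight ys v = ys.countP (fun a => decide (a ≤ v)) := by
  obtain ⟨hle, h1, h2⟩ := PySem.List.bisectRight_spec ys v hs
  exact (countP_eq_of_cut _ ys _ hle
    (fun j hj hjr => by simpa using h1 j hj hjr)
    (fun j hj hrj => by simpa [not_le] using h2 j hj hrj)).symm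

theorem countP_lt_add_eq (v : Int) (l : List Int) :
    l.countP (fun a => decide (a < v)) + l.countP (fun a => decide (v = a)) =
      l.countP (fun a => decide (a ≤ v)) := by
  induction l with
  | nil => simp
  | cons a t ih =>
    simp only [List.countP_cons, ← ih]
    by_cases h1 : a < v
    · have h2 : ¬ v = a := by omega
      simp [h1, h2, h1.le]
      omega
    · by_cases h2 : v = a
      · have h3 : a ≤ v := by omega
        simp [h1, h2, h3]
        omega
      · have h3 : ¬ a ≤ v := by omega
        simp [h1, h2, h3]

-- A's inner loop over y, from an arbitrary accumulator
theorem innerA (xx : Int) (y : List Int) : ∀ u t : Int,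
    y.foldl (fun ut yy =>
      if xx > yy then (ut.1 + 1, ut.2)
      else if xx = yy then (ut.1, ut.2 + 1)
      else ut) (u, t)
    = (u + (y.countP (fun yy => decide (yy < xx)) : Int),
       t + (y.countP (fun yy => decide (xx = yy)) : Int)) := by
  induction y with
  | nil => intro u t; simp
  | cons a l ih =>
    intro u t
    rw [List.foldl_cons]
    split_ifs with hgt heq <;> rw [ih] <;> simp only [List.countP_cons]
    · have hne : ¬ xx = a := by omega
      refine Prod.ext ?_ ?_ <;> simp [show a < xx from hgt, hne] <;> try omega
    · have hnlt : ¬ a < xx := by omega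
      refine Prod.ext ?_ ?_ <;> simp [hnlt, heq] <;> try omega
    · have hnlt : ¬ a < xx := by omega
      refine Prod.ext ?_ ?_ <;> simp [hnlt, heq]

theorem step_eq (y : List Int) (xx : Int) (ut : Int × Int) :
    (y.foldl (fun ut yy =>
      if xx > yy then (ut.1 + 1, ut.2)
      else if xx = yy then (ut.1, ut.2 + 1)
      else ut) ut)
    = (ut.1 + (PySem.List.bisectLeft (PySem.List.sorted y (fun v => v) false) xx : Int),
       ut.2 + ((PySem.List.bisectRight (PySem.List.sorted y (fun v => v) false) xx : Int)
               - (PySem.List.bisectLeft (PySem.List.sorted y (fun v => v) false) xx : Int))) := by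
  have hs : List.Pairwise (fun a b => a ≤ b) (PySem.List.sorted y (fun v => v) false) := by
    simpa using PySem.List.sorted_pairwise y (fun v => v)
  have hperm := PySem.List.sorted_perm y (fun v => v) false
  have hlo := bisectLeft_eq_countP _ xx hs
  have hhi := bisectRight_eq_countP _ xx hs
  have hclt : (PySem.List.sorted y (fun v => v) false).countP (fun a => decide (a < xx))
      = y.countP (fun a => decide (a < xx)) := hperm.countP_eq _
  have hcle : (PySem.List.sorted y (fun v => v) false).countP (fun a => decide (a ≤ xx))
      = y.countP (fun a => decide (a ≤ xx)) := hperm.countP_eq _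
  obtain ⟨u, t⟩ := ut
  rw [innerA xx y u t]
  have hsum := countP_lt_add_eq xx y
  refine Prod.ext ?_ ?_
  · simp [hlo, hclt]
  · simp only [hlo, hhi, hclt, hcle]
    have : (y.countP (fun a => decide (a ≤ xx)) : Int)
        - (y.countP (fun a => decide (a < xx)) : Int)
        = (y.countP (fun a => decide (xx = a)) : Int) := by
      push_cast [← hsum]; ring
    simp [this]

theorem foldA_eq_foldB (y : List Int) : ∀ (l : List Int) (acc : Int × Int),
    l.foldl (fun ut xx =>
      y.foldl (fun ut yy =>
        if xx > yy then (ut.1 + 1, ut.2)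
        else if xx = yy then (ut.1, ut.2 + 1)
        else ut) ut) acc
    = l.foldl (fun ut xx =>
        (ut.1 + (PySem.List.bisectLeft (PySem.List.sorted y (fun v => v) false) xx : Int),
         ut.2 + ((PySem.List.bisectRight (PySem.List.sorted y (fun v => v) false) xx : Int)
                 - (PySem.List.bisectLeft (PySem.List.sorted y (fun v => v) false) xx : Int)))) acc := by
  intro l
  induction l with
  | nil => intro acc; rfl
  | cons b m ihm =>
    intro acc
    simp only [List.foldl_cons]
    rw [step_eq]
    exact ihm _

-- ===== VERDICT (by name: the statement is the Claim_ definition above) =====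
theorem mann_whitney_u_u_spec : Claim_equal_mann_whitney_u_u := by
  intro x y _
  unfold Spec_mann_whitney_u_u mann_whitney_u_u mann_whitney_u_u_alt
  exact foldA_eq_foldB y x (0, 0)
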